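-- pv_equiv track=rewrite | github.com/Markyriott/collegestuff | CodePath/TIP102/Unit3/Session1/StandardB/p1.py | time_required_to_stream
-- ===== SOURCE A (Python) =====
-- from collections import deque
--
-- def time_required_to_stream(movies,k):
--     queue = deque()
--     time = 0
--
--     for index, number in enumerate(movies):
--         queue.append((number, index))
--
--     while queue:
--         front = queue.popleft()
--         time += 1
--
--         if front[0] == 1 and front[1] == k:
--             return time
--         elif front[0] > 1:
--             queue.append((front[0] - 1, front[1]))
-- ===== SOURCE B (Python) =====
-- def time_required_to_stream(movies, k):
--     # Process the queue a full round at a time: scan the current round for the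
--     # person k finishing (one movie left), otherwise charge the whole round and
--     # keep, with one movie fewer, everyone who still has movies to watch.
--     time = 0
--     people = [(m, i) for i, m in enumerate(movies)]
--     while people:
--         for pos, (m, i) in enumerate(people):
--             if m == 1 and i == k:
--                 return time + pos + 1
--         time += len(people)
--         people = [(m - 1, i) for m, i in people if m > 1]
-- ===== Notes on version B (the rewrite author's own statement) =====
-- stated objective: alternative
-- what changed: B processes the queue a full round at a time - scan the current round for person k finishing, otherwise charge len(people) ticks at once and rebuild the next round by a filtered comprehension - instead of A's tick-by-tick deque popleft/append rotation.
import Mathlib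
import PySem

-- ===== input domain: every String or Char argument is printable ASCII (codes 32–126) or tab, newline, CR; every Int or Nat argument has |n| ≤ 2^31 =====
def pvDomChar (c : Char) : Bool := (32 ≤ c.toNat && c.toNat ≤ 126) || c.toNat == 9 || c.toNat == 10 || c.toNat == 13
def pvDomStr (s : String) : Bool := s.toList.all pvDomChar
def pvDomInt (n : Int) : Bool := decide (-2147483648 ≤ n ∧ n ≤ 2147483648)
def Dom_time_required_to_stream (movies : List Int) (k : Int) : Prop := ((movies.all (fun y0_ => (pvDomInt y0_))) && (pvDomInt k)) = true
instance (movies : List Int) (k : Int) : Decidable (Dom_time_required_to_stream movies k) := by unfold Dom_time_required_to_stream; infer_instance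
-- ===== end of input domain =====

-- B processes the queue a full round at a time (scan the round for person k finishing,
-- otherwise charge the whole round and rebuild it by a filtered comprehension) instead of
-- A's tick-by-tick deque rotation (objective: alternative; equivalence is about the
-- return value — neither function mutates its arguments).

-- ===== PORT A =====
-- measure for the while loop: each pop shrinks it by at least 1
def pvMeas (q : List (Int × Int)) : Nat := (q.map (fun p => max p.1.toNat 1)).sum

-- the 'while queue:' loop; queue entries are (number, index).
-- fuel only makes the recursion structural: pvMeas strictly drops each iteration,
-- so fuel = pvMeas queue + 1 is never exhausted (pvLoop_eq below needs only pvMeas q < fuel)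
def pvLoop (k : Int) : Nat → List (Int × Int) → Int → Option Int
  | 0, _, _ => none
  | fuel + 1, q, time =>
    match q with
    | [] => none
    | (c, i) :: rest =>
      if c = 1 ∧ i = k then some (time + 1)
      else if 1 < c then pvLoop k fuel (rest ++ [(c - 1, i)]) (time + 1)
      else pvLoop k fuel rest (time + 1)

def time_required_to_stream (movies : List Int) (k : Int) : Option Int :=
  pvLoop k
    (pvMeas ((PySem.List.enumerate movies 0).foldl (fun q p => q ++ [(p.2, p.1)]) []) + 1)
    ((PySem.List.enumerate movies 0).foldl (fun q p => q ++ [(p.2, p.1)]) []) 0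

-- ===== PORT B =====
-- the inner 'for pos, (m, i) in enumerate(people):' scan of the current round
def pvScan (k : Int) : List (Int × Int) → Option Int
  | [] => none
  | (m, i) :: rest => if m = 1 ∧ i = k then some 0 else (pvScan k rest).map (· + 1)

-- the round-rebuilding comprehension '[(m - 1, i) for m, i in people if m > 1]'
def pvRound (q : List (Int × Int)) : List (Int × Int) :=
  (q.filter (fun p => 1 < p.1)).map (fun p => (p.1 - 1, p.2))

-- the 'while people:' loop of Source B; same fuel device as pvLoop (pvMeas drops each round)
def pvRounds (k : Int) : Nat → List (Int × Int) → Int → Option Int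
  | 0, _, _ => none
  | _ + 1, [], _ => none
  | fuel + 1, p :: ps, time =>
    match pvScan k (p :: ps) with
    | some pos => some (time + pos + 1)
    | none => pvRounds k fuel (pvRound (p :: ps)) (time + ((p :: ps).length : Int))

def time_required_to_stream_alt (movies : List Int) (k : Int) : Option Int :=
  pvRounds k
    (pvMeas ((PySem.List.enumerate movies 0).map (fun p => (p.2, p.1))) + 1)
    ((PySem.List.enumerate movies 0).map (fun p => (p.2, p.1))) 0

-- ===== PRECONDITION & SPEC =====
def Spec_time_required_to_stream (movies : List Int) (k : Int) (out : Option Int) : Prop := out = time_required_to_stream_alt movies k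
instance (movies : List Int) (k : Int) (out : Option Int) : Decidable (Spec_time_required_to_stream movies k out) := by unfold Spec_time_required_to_stream; infer_instance

-- ===== CLAIM (what is proved, stated in full; the proofs are below) =====
def Claim_equal_time_required_to_stream : Prop := ∀ (movies : List Int) (k : Int), Dom_time_required_to_stream movies k → Spec_time_required_to_stream movies k (time_required_to_stream movies k)

-- ===== LEMMAS AND PROOFS =====


-- ticks contributed by an entry that sits after the k-entry, k finishing after cap more rounds
def pvCapSum (cap : Int) (q : List (Int × Int)) : Int :=
  (q.map (fun p => min (max p.1 1) cap)).sum

-- characterisation of pvLoop's answer on a queue: none, or (c_k, total remaining ticks)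
def pvF (k : Int) : List (Int × Int) → Option (Int × Int)
  | [] => none
  | (c, i) :: rest =>
    if i = k then (if 1 ≤ c then some (c, c + pvCapSum (c - 1) rest) else none)
    else (pvF k rest).map (fun p => (p.1, min (max c 1) p.1 + p.2))

theorem pvCapSum_zero (q : List (Int × Int)) : pvCapSum 0 q = 0 := by
  induction q with
  | nil => simp [pvCapSum]
  | cons h t ih => simp [pvCapSum] at ih ⊢ <;> omega

theorem pvF_ck_pos (k : Int) (q : List (Int × Int)) (p : Int × Int)
    (h : pvF k q = some p) : 1 ≤ p.1 := by
  induction q generalizing p with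
  | nil => simp [pvF] at h
  | cons hd t ih =>
    obtain ⟨c, i⟩ := hd
    simp only [pvF] at h
    by_cases hi : i = k
    · rw [if_pos hi] at h
      by_cases hc : 1 ≤ c
      · rw [if_pos hc] at h
        cases h
        exact hc
      · rw [if_neg hc] at h
        simp at h
    · rw [if_neg hi] at h
      cases hrf : pvF k t with
      | none => rw [hrf] at h; simp at h
      | some q =>
        rw [hrf] at h
        simp only [Option.map_some, Option.some.injEq] at h
        rw [← h]
        exact ih q hrf

theorem pvF_none (k : Int) (q : List (Int × Int)) (h : ∀ p ∈ q, p.2 ≠ k) :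
    pvF k q = none := by
  induction q with
  | nil => rfl
  | cons hd t ih =>
    obtain ⟨c, i⟩ := hd
    simp only [pvF]
    have hik : i ≠ k := h (c, i) (by simp)
    simp [hik, ih (fun p hp => h p (by simp [hp]))]

theorem pvF_append_nonk (k : Int) (q : List (Int × Int)) (c i : Int) (hi : i ≠ k) :
    pvF k (q ++ [(c, i)]) = (pvF k q).map (fun p => (p.1, p.2 + min (max c 1) (p.1 - 1))) := by
  induction q with
  | nil => simp [pvF, hi]
  | cons hd t ih =>
    obtain ⟨c', i'⟩ := hd
    simp only [List.cons_append, pvF]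
    by_cases hi' : i' = k
    · rw [if_pos hi', if_pos hi']
      by_cases hc' : 1 ≤ c'
      · rw [if_pos hc', if_pos hc']
        simp only [Option.map_some, Option.some.injEq, Prod.mk.injEq, pvCapSum,
          List.map_append, List.sum_append, List.map_cons, List.map_nil,
          List.sum_cons, List.sum_nil]
        exact ⟨by trivial, by ring⟩
      · rw [if_neg hc', if_neg hc']
        simp
    · rw [if_neg hi', if_neg hi', ih]
      cases pvF k t with
      | none => simp
      | some p =>
        simp only [Option.map_some, Option.some.injEq, Prod.mk.injEq]
        exact ⟨by trivial, by ring⟩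

theorem pvF_append_k (k : Int) (q : List (Int × Int)) (c : Int)
    (h : ∀ p ∈ q, p.2 ≠ k) (hc : 1 ≤ c) :
    pvF k (q ++ [(c, k)]) = some (c, pvCapSum c q + c) := by
  induction q with
  | nil => simp [pvF, hc, pvCapSum]
  | cons hd t ih =>
    obtain ⟨c', i'⟩ := hd
    have hik : i' ≠ k := h (c', i') (by simp)
    rw [List.cons_append]
    simp only [pvF]
    rw [if_neg hik, ih (fun p hp => h p (by simp [hp]))]
    simp only [Option.map_some, Option.some.injEq, Prod.mk.injEq, pvCapSum,
      List.map_cons, List.sum_cons]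
    exact ⟨by trivial, by ring⟩

theorem pvLoop_eq (k : Int) (fuel : Nat) (q : List (Int × Int)) (t : Int)
    (hf : pvMeas q < fuel)
    (h : q.countP (fun p => p.2 == k) ≤ 1) :
    pvLoop k fuel q t = (pvF k q).map (fun p => t + p.2) := by
  induction fuel generalizing q t with
  | zero => omega
  | succ n ih =>
    match q, h, hf with
    | [], h, hf => simp [pvLoop, pvF]
    | (c, i) :: rest, h, hf =>
      rw [pvLoop]
      by_cases hci : c = 1 ∧ i = k
      · obtain ⟨rfl, rfl⟩ := hci
        simp [pvF, pvCapSum_zero]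
      rw [if_neg hci]
      by_cases hc : 1 < c
      · rw [if_pos hc]
        have hf' : pvMeas (rest ++ [(c - 1, i)]) < n := by
          simp only [pvMeas, List.map_append, List.map_cons, List.map_nil,
            List.sum_append, List.sum_cons, List.sum_nil] at hf ⊢
          omega
        by_cases hik : i = k
        · subst hik
          have h0 : rest.countP (fun p => p.2 == i) = 0 := by
            rw [List.countP_cons, show (((c, i) : Int × Int).2 == i) = true by simp,
              if_pos rfl] at h
            omega
          have hrest : ∀ p ∈ rest, p.2 ≠ i := by
            intro p hp hpk
            have := List.countP_eq_zero.mp h0 p hp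
            simp [hpk] at this
          have hcnt : (rest ++ [(c - 1, i)]).countP (fun p => p.2 == i) ≤ 1 := by
            rw [List.countP_append, h0,
              show [((c - 1, i) : Int × Int)].countP (fun p => p.2 == i) = 1 by simp]
          rw [ih _ _ hf' hcnt, pvF_append_k i rest (c - 1) hrest (by omega)]
          simp [pvF, show (1:Int) ≤ c by omega]
          try ring
        · have hcnt : (rest ++ [(c - 1, i)]).countP (fun p => p.2 == k) ≤ 1 := by
            rw [List.countP_append,
              show [((c - 1, i) : Int × Int)].countP (fun p => p.2 == k) = 0 by simp [hik]]
            rw [List.countP_cons, show (((c, i) : Int × Int).2 == k) = false by simp [hik]] at h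
            simp only [Bool.false_eq_true, if_false] at h
            omega
          rw [ih _ _ hf' hcnt, pvF_append_nonk k rest (c - 1) i hik]
          simp only [pvF]
          rw [if_neg hik]
          cases hrf : pvF k rest with
          | none => simp
          | some p =>
            have hp1 := pvF_ck_pos k rest p hrf
            simp only [Option.map_some, Option.some.injEq]
            omega
      · rw [if_neg hc]
        have hf' : pvMeas rest < n := by
          simp only [pvMeas, List.map_cons, List.sum_cons] at hf ⊢
          omega
        by_cases hik : i = k
        · subst hik
          have hc1 : c ≠ 1 := fun h' => hci ⟨h', rfl⟩
          have hc0 : c ≤ 0 := by omega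
          have h0 : rest.countP (fun p => p.2 == i) = 0 := by
            rw [List.countP_cons, show (((c, i) : Int × Int).2 == i) = true by simp,
              if_pos rfl] at h
            omega
          have hrest : ∀ p ∈ rest, p.2 ≠ i := by
            intro p hp hpk
            have := List.countP_eq_zero.mp h0 p hp
            simp [hpk] at this
          rw [ih _ _ hf' (by omega), pvF_none i rest hrest]
          simp [pvF, show ¬ (1:Int) ≤ c by omega]
        · have hcnt : rest.countP (fun p => p.2 == k) ≤ 1 := by
            rw [List.countP_cons, show (((c, i) : Int × Int).2 == k) = false by simp [hik]] at h
            simp only [Bool.false_eq_true, if_false] at h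
            omega
          rw [ih _ _ hf' hcnt]
          simp only [pvF]
          rw [if_neg hik]
          cases hrf : pvF k rest with
          | none => simp
          | some p =>
            have hp1 := pvF_ck_pos k rest p hrf
            simp only [Option.map_some, Option.some.injEq]
            omega

theorem pvCount_init (k : Int) (movies : List Int) (s : Int) :
    ((PySem.List.enumerate movies s).map (fun p => (p.2, p.1))).countP (fun p => p.2 == k) ≤ 1 := by
  induction movies generalizing s with
  | nil => simp [PySem.List.enumerate_nil]
  | cons m rest ih =>
    rw [PySem.List.enumerate_cons]
    simp only [List.map_cons, List.countP_cons]
    by_cases hsk : s = k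
    · subst hsk
      have h0 : ((PySem.List.enumerate rest (s + 1)).map (fun p => (p.2, p.1))).countP
          (fun p => p.2 == s) = 0 := by
        rw [List.countP_eq_zero]
        intro p hp
        simp only [List.mem_map] at hp
        obtain ⟨q, hq, rfl⟩ := hp
        rw [PySem.List.mem_enumerate_iff] at hq
        obtain ⟨j, hj, rfl⟩ := hq
        simp; omega
      simp [h0]
    · have := ih (s + 1)
      rw [show (((m, s) : Int × Int).2 == k) = false by simp [hsk]]
      simp only [Bool.false_eq_true, if_false]
      omega

theorem pvRound_cons (m i : Int) (rest : List (Int × Int)) :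
    pvRound ((m, i) :: rest) = if 1 < m then (m - 1, i) :: pvRound rest else pvRound rest := by
  simp only [pvRound, List.filter_cons]
  split_ifs with h₁ h₂ h₃ <;> simp_all

theorem pvScan_mem (k : Int) (q : List (Int × Int)) (pos : Int)
    (h : pvScan k q = some pos) : ∃ p ∈ q, p.1 = 1 ∧ p.2 = k := by
  induction q generalizing pos with
  | nil => simp [pvScan] at h
  | cons hd rest ih =>
    obtain ⟨m, i⟩ := hd
    simp only [pvScan] at h
    by_cases hmi : m = 1 ∧ i = k
    · exact ⟨(m, i), by simp, hmi⟩
    · rw [if_neg hmi] at h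
      cases hs : pvScan k rest with
      | none => rw [hs] at h; simp at h
      | some p' =>
        obtain ⟨p, hp, hp1⟩ := ih p' hs
        exact ⟨p, by simp [hp], hp1⟩

theorem pvF_scan_some (k : Int) (q : List (Int × Int)) (pos : Int)
    (hcnt : q.countP (fun p => p.2 == k) ≤ 1) (h : pvScan k q = some pos) :
    pvF k q = some (1, pos + 1) := by
  induction q generalizing pos with
  | nil => simp [pvScan] at h
  | cons hd rest ih =>
    obtain ⟨m, i⟩ := hd
    simp only [pvScan] at h
    by_cases hmi : m = 1 ∧ i = k
    · rw [if_pos hmi] at h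
      obtain ⟨rfl, rfl⟩ := hmi
      cases h
      simp [pvF, pvCapSum_zero]
    · rw [if_neg hmi] at h
      cases hs : pvScan k rest with
      | none => rw [hs] at h; simp at h
      | some p' =>
        rw [hs] at h
        simp only [Option.map_some, Option.some.injEq] at h
        subst h
        by_cases hik : i = k
        · exfalso
          rw [List.countP_cons, show (((m, i) : Int × Int).2 == k) = true by simp [hik],
            if_pos rfl] at hcnt
          obtain ⟨p, hp, _, hpk⟩ := pvScan_mem k rest p' hs
          have : rest.countP (fun p => p.2 == k) ≠ 0 := by
            intro h0
            have := List.countP_eq_zero.mp h0 p hp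
            simp [hpk] at this
          omega
        · have hcnt' : rest.countP (fun p => p.2 == k) ≤ 1 := by
            rw [List.countP_cons, show (((m, i) : Int × Int).2 == k) = false by simp [hik]] at hcnt
            simp only [Bool.false_eq_true, if_false] at hcnt
            omega
          simp only [pvF, if_neg hik, ih p' hcnt' hs, Option.map_some, Option.some.injEq,
            Prod.mk.injEq]
          exact ⟨trivial, by omega⟩

theorem pvRound_snd_mem (q : List (Int × Int)) (p : Int × Int) (hp : p ∈ pvRound q) :
    ∃ m, (m, p.2) ∈ q := by
  simp only [pvRound, List.mem_map, List.mem_filter] at hp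
  obtain ⟨r, ⟨hr, _⟩, rfl⟩ := hp
  exact ⟨r.1, by simpa using hr⟩

theorem pvCapSum_round (cap : Int) (q : List (Int × Int)) (hcap : 1 ≤ cap) :
    pvCapSum cap q = pvCapSum (cap - 1) (pvRound q) + (q.length : Int) := by
  induction q with
  | nil => simp [pvCapSum, pvRound]
  | cons hd rest ih =>
    obtain ⟨m, i⟩ := hd
    rw [pvRound_cons]
    by_cases hm : 1 < m
    · rw [if_pos hm]
      simp only [pvCapSum, List.map_cons, List.sum_cons, List.length_cons] at ih ⊢
      push_cast
      have := ih
      omega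
    · rw [if_neg hm]
      simp only [pvCapSum, List.map_cons, List.sum_cons, List.length_cons] at ih ⊢
      push_cast
      omega

theorem pvCount_round (k : Int) (q : List (Int × Int)) :
    (pvRound q).countP (fun p => p.2 == k) ≤ q.countP (fun p => p.2 == k) := by
  induction q with
  | nil => simp [pvRound]
  | cons hd rest ih =>
    obtain ⟨m, i⟩ := hd
    rw [pvRound_cons]
    by_cases hm : 1 < m
    · rw [if_pos hm]
      simp only [List.countP_cons]
      split_ifs <;> omega
    · rw [if_neg hm]
      simp only [List.countP_cons]
      split_ifs <;> omega

theorem pvMeas_round (q : List (Int × Int)) :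
    pvMeas (pvRound q) + q.length ≤ pvMeas q := by
  induction q with
  | nil => simp [pvMeas, pvRound]
  | cons hd rest ih =>
    obtain ⟨m, i⟩ := hd
    rw [pvRound_cons]
    by_cases hm : 1 < m
    · rw [if_pos hm]
      simp only [pvMeas, List.map_cons, List.sum_cons, List.length_cons] at ih ⊢
      omega
    · rw [if_neg hm]
      simp only [pvMeas, List.map_cons, List.sum_cons, List.length_cons] at ih ⊢
      omega

theorem pvF_scan_none (k : Int) (q : List (Int × Int))
    (hcnt : q.countP (fun p => p.2 == k) ≤ 1) (h : pvScan k q = none) :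
    pvF k q = (pvF k (pvRound q)).map (fun p => (p.1 + 1, p.2 + (q.length : Int))) := by
  induction q with
  | nil => simp [pvF, pvRound]
  | cons hd rest ih =>
    obtain ⟨m, i⟩ := hd
    simp only [pvScan] at h
    have hmi : ¬ (m = 1 ∧ i = k) := by
      intro hc; rw [if_pos hc] at h; simp at h
    rw [if_neg hmi] at h
    have hs : pvScan k rest = none := by
      cases hs' : pvScan k rest with
      | none => rfl
      | some p' => rw [hs'] at h; simp at h
    rw [pvRound_cons]
    by_cases hik : i = k
    · subst hik
      have h0 : rest.countP (fun p => p.2 == i) = 0 := by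
        rw [List.countP_cons, show (((m, i) : Int × Int).2 == i) = true by simp,
          if_pos rfl] at hcnt
        omega
      have hrest : ∀ p ∈ rest, p.2 ≠ i := by
        intro p hp hpk
        have := List.countP_eq_zero.mp h0 p hp
        simp [hpk] at this
      by_cases hm : 1 < m
      · rw [if_pos hm]
        have hrest' : ∀ p ∈ pvRound rest, p.2 ≠ i := by
          intro p hp
          obtain ⟨m', hm'⟩ := pvRound_snd_mem rest p hp
          intro hpk
          exact hrest (m', p.2) hm' hpk
        simp only [pvF, if_pos rfl, if_pos (show (1:Int) ≤ m by omega),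
          if_pos (show (1:Int) ≤ m - 1 by omega), Option.map_some, Option.some.injEq,
          Prod.mk.injEq, List.length_cons]
        rw [pvCapSum_round (m - 1) rest (by omega)]
        push_cast
        simp only [Option.map_some, Option.some.injEq, Prod.mk.injEq]
        constructor <;> omega
      · rw [if_neg hm]
        have hm0 : ¬ (1 : Int) ≤ m := by
          rcases hmi with hmi
          intro h1
          exact hmi ⟨by omega, rfl⟩
        rw [pvF_none i (pvRound rest) (by
          intro p hp
          obtain ⟨m', hm'⟩ := pvRound_snd_mem rest p hp
          intro hpk
          exact hrest (m', p.2) hm' hpk)]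
        simp [pvF, hm0]
    · have hcnt' : rest.countP (fun p => p.2 == k) ≤ 1 := by
        rw [List.countP_cons, show (((m, i) : Int × Int).2 == k) = false by simp [hik]] at hcnt
        simp only [Bool.false_eq_true, if_false] at hcnt
        omega
      have ihr := ih hcnt' hs
      by_cases hm : 1 < m
      · rw [if_pos hm]
        simp only [pvF, if_neg hik, ihr]
        cases hrr : pvF k (pvRound rest) with
        | none => simp
        | some p =>
          have hp1 := pvF_ck_pos k (pvRound rest) p hrr
          simp only [Option.map_some, Option.some.injEq, Prod.mk.injEq, List.length_cons]
          push_cast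
          exact ⟨trivial, by omega⟩
      · rw [if_neg hm]
        simp only [pvF, if_neg hik, ihr]
        cases hrr : pvF k (pvRound rest) with
        | none => simp
        | some p =>
          have hp1 := pvF_ck_pos k (pvRound rest) p hrr
          simp only [Option.map_some, Option.some.injEq, Prod.mk.injEq, List.length_cons]
          push_cast
          exact ⟨trivial, by omega⟩

theorem pvRounds_eq (k : Int) (fuel : Nat) (q : List (Int × Int)) (t : Int)
    (hf : pvMeas q < fuel)
    (hcnt : q.countP (fun p => p.2 == k) ≤ 1) :
    pvRounds k fuel q t = (pvF k q).map (fun p => t + p.2) := by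
  induction fuel generalizing q t with
  | zero => omega
  | succ n ih =>
    match q, hcnt, hf with
    | [], hcnt, hf => simp [pvRounds, pvF]
    | hd :: tl, hcnt, hf =>
      rw [pvRounds]
      cases hs : pvScan k (hd :: tl) with
      | some pos =>
        rw [pvF_scan_some k (hd :: tl) pos hcnt hs]
        simp only [Option.map_some, Option.some.injEq]
        omega
      | none =>
        have hf' : pvMeas (pvRound (hd :: tl)) < n := by
          have := pvMeas_round (hd :: tl)
          simp only [List.length_cons] at this
          omega
        have hcnt' := le_trans (pvCount_round k (hd :: tl)) hcnt
        rw [ih (pvRound (hd :: tl)) _ hf' hcnt', pvF_scan_none k (hd :: tl) hcnt hs]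
        cases pvF k (pvRound (hd :: tl)) with
        | none => simp
        | some p =>
          simp only [Option.map_some, Option.some.injEq, List.length_cons]
          push_cast
          ring

-- ===== VERDICT (by name: the statement is the Claim_ definition above) =====
theorem time_required_to_stream_spec : Claim_equal_time_required_to_stream := by
  intro movies k _
  unfold Spec_time_required_to_stream time_required_to_stream time_required_to_stream_alt
  rw [PySem.List.foldl_append_singleton_eq_map, List.nil_append]
  rw [pvLoop_eq k _ _ 0 (Nat.lt_succ_self _) (pvCount_init k movies 0),
    pvRounds_eq k _ _ 0 (Nat.lt_succ_self _) (pvCount_init k movies 0)]
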